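-- pv_equiv track=rewrite | github.com/tobzbobz/tobzbobz | cogs/erlc.py | filter_players
-- ===== SOURCE A (Python) =====
-- from typing import Optional, Literal
--
-- def filter_players(players: list, team: Optional[str] = None, callsign: Optional[str] = None,
--                    permission: Optional[str] = None, player_query: Optional[str] = None) -> list:
--     """Filter players based on criteria."""
--     filtered = players
--
--     if team:
--         filtered = [p for p in filtered if p.get('Team', '').lower() == team.lower()]
--
--     if callsign:
--         filtered = [p for p in filtered if p.get('Callsign', '').lower() == callsign.lower()]
--
--     if permission:
--         filtered = [p for p in filtered if p.get('Permission', '').lower() == permission.lower()]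
--
--     if player_query:
--         filtered = [p for p in filtered if player_query.lower() in p.get('Player', '').lower()]
--
--     return filtered
-- ===== SOURCE B (Python) =====
-- def filter_players(players: list, team=None, callsign=None, permission=None, player_query=None) -> list:
--     """Filter players in a single pass using a list of predicates built from the active criteria."""
--     preds = []
--     if team:
--         t = team.lower()
--         preds.append(lambda p: p.get('Team', '').lower() == t)
--     if callsign:
--         c = callsign.lower()
--         preds.append(lambda p: p.get('Callsign', '').lower() == c)
--     if permission:
--         m = permission.lower()
--         preds.append(lambda p: p.get('Permission', '').lower() == m)
--     if player_query:
--         q = player_query.lower()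
--         preds.append(lambda p: q in p.get('Player', '').lower())
--     if not preds:
--         return players
--     return [p for p in players if all(pred(p) for pred in preds)]
-- ===== Notes on version B (the rewrite author's own statement) =====
-- stated objective: faster
-- what changed: B builds a list of predicate closures for the active criteria (pre-lowering each criterion string once) and filters the player list in a single pass with all(), instead of A's up-to-four successive list comprehensions each rebuilding the whole list and re-lowering the criterion per player.
import Mathlib
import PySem

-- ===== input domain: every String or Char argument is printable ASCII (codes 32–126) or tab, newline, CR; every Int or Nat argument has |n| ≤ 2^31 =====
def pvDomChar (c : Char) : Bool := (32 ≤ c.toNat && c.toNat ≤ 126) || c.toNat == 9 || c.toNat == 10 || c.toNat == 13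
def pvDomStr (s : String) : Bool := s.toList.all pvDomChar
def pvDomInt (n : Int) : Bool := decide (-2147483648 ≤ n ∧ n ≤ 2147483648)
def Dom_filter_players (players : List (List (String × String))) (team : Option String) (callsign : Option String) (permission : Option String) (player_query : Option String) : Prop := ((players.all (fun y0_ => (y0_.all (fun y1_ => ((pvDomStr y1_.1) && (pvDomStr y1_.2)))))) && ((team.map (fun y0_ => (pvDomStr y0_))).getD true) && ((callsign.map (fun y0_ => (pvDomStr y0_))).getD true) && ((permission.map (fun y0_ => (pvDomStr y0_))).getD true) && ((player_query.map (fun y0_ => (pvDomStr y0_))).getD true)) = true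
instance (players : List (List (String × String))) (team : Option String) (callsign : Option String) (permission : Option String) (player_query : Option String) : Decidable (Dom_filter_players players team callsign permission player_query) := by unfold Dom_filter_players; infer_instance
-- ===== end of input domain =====

-- B filters the list once with a list of predicate closures built from the active criteria; A chains four comprehensions. Same cost class; return value only (no mutation in either).

-- Python truthiness of an Optional[str]: true iff present and non-empty.
def pvTruthyStr (o : Option String) : Bool :=
  match o with
  | none => false
  | some s => !(s == "")

-- ===== PORT A =====
def filter_players (players : List (List (String × String))) (team : Option String) (callsign : Option String) (permission : Option String) (player_query : Option String) : List (List (String × String)) :=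
  let filtered := players
  let filtered := if pvTruthyStr team then
      filtered.filter (fun p => PySem.Str.lower ((PySem.Dict.mk p).getD "Team" "") == PySem.Str.lower (team.getD ""))
    else filtered
  let filtered := if pvTruthyStr callsign then
      filtered.filter (fun p => PySem.Str.lower ((PySem.Dict.mk p).getD "Callsign" "") == PySem.Str.lower (callsign.getD ""))
    else filtered
  let filtered := if pvTruthyStr permission then
      filtered.filter (fun p => PySem.Str.lower ((PySem.Dict.mk p).getD "Permission" "") == PySem.Str.lower (permission.getD ""))
    else filtered
  let filtered := if pvTruthyStr player_query then
      filtered.filter (fun p => PySem.Str.isIn (PySem.Str.lower (player_query.getD "")) (PySem.Str.lower ((PySem.Dict.mk p).getD "Player" "")))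
    else filtered
  filtered

-- ===== PORT B =====
def filter_players_alt (players : List (List (String × String))) (team : Option String) (callsign : Option String) (permission : Option String) (player_query : Option String) : List (List (String × String)) :=
  let preds : List (List (String × String) → Bool) := []
  let preds := if pvTruthyStr team then
      let t := PySem.Str.lower (team.getD "")
      preds ++ [fun p => PySem.Str.lower ((PySem.Dict.mk p).getD "Team" "") == t]
    else preds
  let preds := if pvTruthyStr callsign then
      let c := PySem.Str.lower (callsign.getD "")
      preds ++ [fun p => PySem.Str.lower ((PySem.Dict.mk p).getD "Callsign" "") == c]
    else preds
  let preds := if pvTruthyStr permission then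
      let m := PySem.Str.lower (permission.getD "")
      preds ++ [fun p => PySem.Str.lower ((PySem.Dict.mk p).getD "Permission" "") == m]
    else preds
  let preds := if pvTruthyStr player_query then
      let q := PySem.Str.lower (player_query.getD "")
      preds ++ [fun p => PySem.Str.isIn q (PySem.Str.lower ((PySem.Dict.mk p).getD "Player" ""))]
    else preds
  if preds.isEmpty then players
  else players.filter (fun p => preds.all (fun pred => pred p))

-- ===== PRECONDITION & SPEC =====
def Spec_filter_players (players : List (List (String × String))) (team : Option String) (callsign : Option String) (permission : Option String) (player_query : Option String) (out : List (List (String × String))) : Prop := out = filter_players_alt players team callsign permission player_query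
instance (players : List (List (String × String))) (team : Option String) (callsign : Option String) (permission : Option String) (player_query : Option String) (out : List (List (String × String))) : Decidable (Spec_filter_players players team callsign permission player_query out) := by unfold Spec_filter_players; infer_instance

-- ===== CLAIM (what is proved, stated in full; the proofs are below) =====
def Claim_equal_filter_players : Prop := ∀ (players : List (List (String × String))) (team : Option String) (callsign : Option String) (permission : Option String) (player_query : Option String), Dom_filter_players players team callsign permission player_query → Spec_filter_players players team callsign permission player_query (filter_players players team callsign permission player_query)

-- ===== LEMMAS AND PROOFS =====

-- A chain of four conditional filters equals one filter by the conjunction of the selected predicates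
-- (appended in the same order); commuting the conjunction is justified pointwise.
theorem chain_eq {α : Type} (xs : List α) (c1 c2 c3 c4 : Bool) (p1 p2 p3 p4 : α → Bool) :
  (let f := xs;
   let f := if c1 then f.filter p1 else f;
   let f := if c2 then f.filter p2 else f;
   let f := if c3 then f.filter p3 else f;
   let f := if c4 then f.filter p4 else f;
   f) =
  (let l : List (α → Bool) := [];
   let l := if c1 then l ++ [p1] else l;
   let l := if c2 then l ++ [p2] else l;
   let l := if c3 then l ++ [p3] else l;
   let l := if c4 then l ++ [p4] else l;
   if l.isEmpty then xs else xs.filter (fun a => l.all (fun p => p a))) := by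
  cases c1 <;> cases c2 <;> cases c3 <;> cases c4 <;>
    simp [List.filter_filter] <;>
      exact List.filter_congr (fun a _ => by cases p1 a <;> cases p2 a <;> cases p3 a <;> cases p4 a <;> rfl)

-- ===== VERDICT (by name: the statement is the Claim_ definition above) =====
theorem filter_players_spec : Claim_equal_filter_players := by
  intro players team callsign permission player_query _
  show filter_players players team callsign permission player_query = filter_players_alt players team callsign permission player_query
  unfold filter_players filter_players_alt
  exact chain_eq players (pvTruthyStr team) (pvTruthyStr callsign) (pvTruthyStr permission) (pvTruthyStr player_query)
    (fun p => PySem.Str.lower ((PySem.Dict.mk p).getD "Team" "") == PySem.Str.lower (team.getD ""))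
    (fun p => PySem.Str.lower ((PySem.Dict.mk p).getD "Callsign" "") == PySem.Str.lower (callsign.getD ""))
    (fun p => PySem.Str.lower ((PySem.Dict.mk p).getD "Permission" "") == PySem.Str.lower (permission.getD ""))
    (fun p => PySem.Str.isIn (PySem.Str.lower (player_query.getD "")) (PySem.Str.lower ((PySem.Dict.mk p).getD "Player" "")))
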